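-- pv_equiv track=rewrite | github.com/phunc20/interviews | vantix/kadane.py | alternating_kadane
-- ===== SOURCE A (Python) =====
-- def alternating_kadane(L, first_negative=False):
--     if first_negative:
--         max_current = max_global = -L[0]
--     else:
--         max_current = max_global = L[0]
--     if first_negative:
--         for p in range(1, len(L)):
--             x = L[p]
--             y = (-1)**(p+1) * x
--             max_current = max(y, max_current + y)
--             if max_current > max_global:
--                 max_global = max_current
--     else:
--         for p in range(1, len(L)):
--             x = L[p]
--             y = (-1)**(p) * x
--             max_current = max(y, max_current + y)
--             if max_current > max_global:
--                 max_global = max_current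
--     return max_global
-- ===== SOURCE B (Python) =====
-- def alternating_kadane(L, first_negative=False):
--     sign = -1 if first_negative else 1
--     best = sign * L[0]
--     prefix = 0
--     min_prefix = 0
--     for x in L:
--         prefix += sign * x
--         best = max(best, prefix - min_prefix)
--         min_prefix = min(min_prefix, prefix)
--         sign = -sign
--     return best
-- ===== Notes on version B (the rewrite author's own statement) =====
-- stated objective: alternative
-- what changed: A's Kadane max_current recurrence over alternately-signed terms is replaced by the prefix-sum formulation: B accumulates the signed running prefix sum and a running minimum prefix, taking best = max(prefix - min_prefix); no max_current state and no (-1)**p exists in B.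
import Mathlib
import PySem

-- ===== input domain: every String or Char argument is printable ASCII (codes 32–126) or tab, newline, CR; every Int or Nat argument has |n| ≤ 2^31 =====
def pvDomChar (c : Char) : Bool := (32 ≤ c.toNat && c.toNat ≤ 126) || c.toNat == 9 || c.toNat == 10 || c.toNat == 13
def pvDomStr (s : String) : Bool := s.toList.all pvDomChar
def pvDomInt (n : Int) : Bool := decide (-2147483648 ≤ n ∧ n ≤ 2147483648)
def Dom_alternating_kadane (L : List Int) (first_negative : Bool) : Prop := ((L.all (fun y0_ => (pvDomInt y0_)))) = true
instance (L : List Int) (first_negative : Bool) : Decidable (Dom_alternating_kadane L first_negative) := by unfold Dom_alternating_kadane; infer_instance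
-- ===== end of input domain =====

-- B replaces A's Kadane max_current recurrence by the prefix-sum / running-minimum-prefix
-- formulation of maximum subarray sum over the alternately-signed values; objective: alternative, same O(n) cost.

-- ===== PORT A =====
def alternating_kadane (L : List Int) (first_negative : Bool) : Int :=
  let init : Int := if first_negative then -((PySem.List.pyGet? L 0).getD 0)
                    else (PySem.List.pyGet? L 0).getD 0
  if first_negative then
    let st := (PySem.List.pyRange 1 (L.length : Int) 1).foldl
      (fun (s : Int × Int) (p : Int) =>
        let x := PySem.List.pyGetD L p 0
        let y := (-1 : Int) ^ (p + 1).toNat * x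
        let mc := max y (s.1 + y)
        (mc, if mc > s.2 then mc else s.2)) (init, init)
    st.2
  else
    let st := (PySem.List.pyRange 1 (L.length : Int) 1).foldl
      (fun (s : Int × Int) (p : Int) =>
        let x := PySem.List.pyGetD L p 0
        let y := (-1 : Int) ^ p.toNat * x
        let mc := max y (s.1 + y)
        (mc, if mc > s.2 then mc else s.2)) (init, init)
    st.2

-- ===== PORT B =====
-- state: (best, prefix, min_prefix, sign)
def alternating_kadane_alt (L : List Int) (first_negative : Bool) : Int :=
  let sign0 : Int := if first_negative then -1 else 1
  let best0 : Int := sign0 * ((PySem.List.pyGet? L 0).getD 0)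
  let st := L.foldl
    (fun (s : Int × Int × Int × Int) (x : Int) =>
      let prefix' := s.2.1 + s.2.2.2 * x
      let best' := max s.1 (prefix' - s.2.2.1)
      let minp' := min s.2.2.1 prefix'
      (best', prefix', minp', -s.2.2.2)) (best0, 0, 0, sign0)
  st.1

-- ===== PRECONDITION & SPEC =====
-- Pre_ excludes only the empty list, on which both A and B raise IndexError at the first-element access.
def Pre_alternating_kadane (L : List Int) (first_negative : Bool) : Prop := L ≠ []
instance (L : List Int) (first_negative : Bool) : Decidable (Pre_alternating_kadane L first_negative) := by unfold Pre_alternating_kadane; infer_instance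
def pvWitness_alternating_kadane : List Int × Bool := ([3, -1, 4, -2], true)

def Spec_alternating_kadane (L : List Int) (first_negative : Bool) (out : Int) : Prop := out = alternating_kadane_alt L first_negative
instance (L : List Int) (first_negative : Bool) (out : Int) : Decidable (Spec_alternating_kadane L first_negative out) := by unfold Spec_alternating_kadane; infer_instance

-- ===== CLAIM =====
def Claim_equal_alternating_kadane : Prop := ∀ (L : List Int) (first_negative : Bool), Dom_alternating_kadane L first_negative → Pre_alternating_kadane L first_negative → Spec_alternating_kadane L first_negative (alternating_kadane L first_negative)

-- ===== LEMMAS AND PROOFS =====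

-- element-wise Kadane with an explicit alternating sign: common reference shape for A's two index folds
def kGo : List Int → Int → Int × Int → Int × Int
  | [], _, st => st
  | x :: xs, s, st =>
      let y := s * x
      let mc := max y (st.1 + y)
      kGo xs (-s) (mc, if mc > st.2 then mc else st.2)

lemma kGo_snoc (xs : List Int) (x : Int) : ∀ (s : Int) (st : Int × Int),
    kGo (xs ++ [x]) s st =
      (let y := s * (-1 : Int) ^ xs.length * x
       let mc := max y ((kGo xs s st).1 + y)
       (mc, if mc > (kGo xs s st).2 then mc else (kGo xs s st).2)) := by
  induction xs with
  | nil => intro s st; simp [kGo]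
  | cons a as ih =>
      intro s st
      simp only [List.cons_append, kGo, ih, List.length_cons, pow_succ]
      have hc : s * ((-1:Int) ^ as.length * -1) * x = -s * (-1:Int) ^ as.length * x := by ring
      rw [hc]

-- A's index fold over pyRange with sign (-1)^(p+e) is kGo over the tail with start sign (-1)^(1+e)
lemma foldA_eq_kGo (a : Int) (e : Nat) (t : List Int) (init : Int × Int) :
    (PySem.List.pyRange 1 (((a :: t).length : Int)) 1).foldl
      (fun (s : Int × Int) (p : Int) =>
        let x := PySem.List.pyGetD (a :: t) p 0
        let y := (-1 : Int) ^ (p + e).toNat * x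
        let mc := max y (s.1 + y)
        (mc, if mc > s.2 then mc else s.2)) init
    = kGo t ((-1 : Int) ^ (1 + e)) init := by
  induction t using List.reverseRecOn with
  | nil => simp [PySem.List.pyRange, kGo]
  | append_singleton t' x ih =>
      have hlen : ((a :: (t' ++ [x])).length : Int) = ((a :: t').length : Int) + 1 := by
        simp
      rw [hlen, PySem.List.pyRange_one_succ_right (by simp), List.foldl_append]
      simp only [List.foldl_cons, List.foldl_nil]
      have hcongr :
          (PySem.List.pyRange 1 (((a :: t').length : Int)) 1).foldl
            (fun (s : Int × Int) (p : Int) =>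
              let x0 := PySem.List.pyGetD (a :: (t' ++ [x])) p 0
              let y := (-1 : Int) ^ (p + e).toNat * x0
              let mc := max y (s.1 + y)
              (mc, if mc > s.2 then mc else s.2)) init
          = (PySem.List.pyRange 1 (((a :: t').length : Int)) 1).foldl
            (fun (s : Int × Int) (p : Int) =>
              let x0 := PySem.List.pyGetD (a :: t') p 0
              let y := (-1 : Int) ^ (p + e).toNat * x0
              let mc := max y (s.1 + y)
              (mc, if mc > s.2 then mc else s.2)) init := by
        refine PySem.List.foldl_congr_mem _ _ _ _ ?_
        intro acc p hp
        obtain ⟨h1, h2⟩ := PySem.List.mem_pyRange_one.mp hp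
        have hlt : p.toNat < (a :: t').length := by
          simp at h2 ⊢; omega
        have hg : PySem.List.pyGetD (a :: (t' ++ [x])) p 0 = PySem.List.pyGetD (a :: t') p 0 := by
          rw [PySem.List.pyGetD_eq_getElem _ _ (by omega) (by simp at h2 ⊢; omega),
              PySem.List.pyGetD_eq_getElem _ _ (by omega) h2]
          exact List.getElem_append_left (bs := [x]) hlt
        simp only [hg]
      rw [hcongr, ih, kGo_snoc]
      have hgetx : PySem.List.pyGetD (a :: (t' ++ [x])) (((a :: t').length : Int)) 0 = x := by
        rw [PySem.List.pyGetD_natCast]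
        simp [List.getD]
      have htoNat : ((((a :: t').length : Int)) + (e : Int)).toNat = (a :: t').length + e := by
        omega
      have hsign : (-1 : Int) ^ ((a :: t').length + e) = (-1 : Int) ^ (1 + e) * (-1 : Int) ^ t'.length := by
        simp only [List.length_cons]; ring
      simp only [hgetx, htoNat, hsign]

-- main invariant: Kadane state (mc, mg) vs prefix-min state (best, prefix, minp)
lemma kGo_eq_pm : ∀ (t : List Int) (s mc mg best pref minp : Int),
    mg = best → minp = min (pref - mc) pref →
    (kGo t s (mc, mg)).2 =
      (t.foldl (fun (st : Int × Int × Int × Int) (x : Int) =>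
        let prefix' := st.2.1 + st.2.2.2 * x
        let best' := max st.1 (prefix' - st.2.2.1)
        let minp' := min st.2.2.1 prefix'
        (best', prefix', minp', -st.2.2.2)) (best, pref, minp, s)).1 := by
  intro t
  induction t with
  | nil => intro s mc mg best pref minp h1 _; simpa [kGo] using h1
  | cons x xs ih =>
      intro s mc mg best pref minp h1 h2
      simp only [kGo, List.foldl_cons]
      apply ih
      · subst h1 h2
        rcases le_total (pref - mc) pref with h | h <;>
          simp [max_def, min_def] at * <;> split_ifs <;> omega
      · subst h2
        rcases le_total (pref - mc) pref with h | h <;>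
          simp [max_def, min_def] <;> split_ifs <;> omega

-- ===== VERDICT =====
theorem alternating_kadane_spec : Claim_equal_alternating_kadane := by
  intro L fn _ hpre
  unfold Spec_alternating_kadane Pre_alternating_kadane at *
  show alternating_kadane L fn = alternating_kadane_alt L fn
  obtain ⟨a, t, rfl⟩ : ∃ a t, L = a :: t := by
    cases L with
    | nil => exact absurd rfl hpre
    | cons a t => exact ⟨a, t, rfl⟩
  unfold alternating_kadane alternating_kadane_alt
  simp only [PySem.List.pyGet?_zero_cons, Option.getD_some, List.foldl_cons]
  cases fn with
  | false =>
      simp only [Bool.false_eq_true, if_false]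
      rw [show (fun (s : Int × Int) (p : Int) =>
            let x := PySem.List.pyGetD (a :: t) p 0
            let y := (-1 : Int) ^ p.toNat * x
            let mc := max y (s.1 + y)
            (mc, if mc > s.2 then mc else s.2))
          = (fun (s : Int × Int) (p : Int) =>
            let x := PySem.List.pyGetD (a :: t) p 0
            let y := (-1 : Int) ^ (p + (0:Nat)).toNat * x
            let mc := max y (s.1 + y)
            (mc, if mc > s.2 then mc else s.2)) from by simp]
      rw [foldA_eq_kGo a 0 t (a, a)]
      exact kGo_eq_pm t ((-1)^(1+0)) a a (max (1 * a) (0 + 1 * a - 0)) (0 + 1 * a)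
        (min 0 (0 + 1 * a)) (by omega) (by omega)
  | true =>
      simp only [reduceIte]
      rw [show (fun (s : Int × Int) (p : Int) =>
            let x := PySem.List.pyGetD (a :: t) p 0
            let y := (-1 : Int) ^ (p + 1).toNat * x
            let mc := max y (s.1 + y)
            (mc, if mc > s.2 then mc else s.2))
          = (fun (s : Int × Int) (p : Int) =>
            let x := PySem.List.pyGetD (a :: t) p 0
            let y := (-1 : Int) ^ (p + (1:Nat)).toNat * x
            let mc := max y (s.1 + y)
            (mc, if mc > s.2 then mc else s.2)) from by norm_num]
      rw [foldA_eq_kGo a 1 t (-a, -a)]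
      exact kGo_eq_pm t ((-1)^(1+1)) (-a) (-a) (max (-1 * a) (0 + -1 * a - 0)) (0 + -1 * a)
        (min 0 (0 + -1 * a)) (by omega) (by omega)
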